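-- pv_equiv track=rewrite | github.com/MPawek/Camera-Stereopsis | silhouette_stereo_measure.py | choose_cube_front_face_columns
-- ===== SOURCE A (Python) =====
-- from typing import Any, Dict, List, Optional, Sequence, Tuple
--
-- def choose_cube_front_face_columns(edge_columns: Sequence[int], face_side: str) -> Tuple[int, int]:
--     if len(edge_columns) < 2:
--         raise ValueError(f"Need at least 2 vertical edge columns, found {len(edge_columns)}: {edge_columns}")
--
--     cols = sorted(int(x) for x in edge_columns)
--     if face_side == "side-left":
--         selected = cols[-2:]
--     elif face_side == "side-right":
--         selected = cols[:2]
--     else: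
--         raise ValueError(f"Unknown face_side: {face_side}")
--     return selected[0], selected[1]
-- ===== SOURCE B (Python) =====
-- from typing import Sequence, Tuple
--
-- def choose_cube_front_face_columns(edge_columns: Sequence[int], face_side: str) -> Tuple[int, int]:
--     if len(edge_columns) < 2:
--         raise ValueError(f"Need at least 2 vertical edge columns, found {len(edge_columns)}: {edge_columns}")
--
--     a, b = int(edge_columns[0]), int(edge_columns[1])
--     if a > b:
--         a, b = b, a
--     if face_side == "side-left":
--         # single pass keeping the two largest values (a <= b)
--         for x in edge_columns[2:]:
--             x = int(x)
--             if x > b: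
--                 a, b = b, x
--             elif x > a:
--                 a = x
--         return a, b
--     elif face_side == "side-right":
--         # single pass keeping the two smallest values (a <= b)
--         for x in edge_columns[2:]:
--             x = int(x)
--             if x < a:
--                 a, b = x, a
--             elif x < b:
--                 b = x
--         return a, b
--     else:
--         raise ValueError(f"Unknown face_side: {face_side}")
-- ===== Notes on version B (the rewrite author's own statement) =====
-- stated objective: faster
-- what changed: Replaces sort-then-slice with a single linear pass that tracks the two largest (side-left) or two smallest (side-right) values.
import Mathlib
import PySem

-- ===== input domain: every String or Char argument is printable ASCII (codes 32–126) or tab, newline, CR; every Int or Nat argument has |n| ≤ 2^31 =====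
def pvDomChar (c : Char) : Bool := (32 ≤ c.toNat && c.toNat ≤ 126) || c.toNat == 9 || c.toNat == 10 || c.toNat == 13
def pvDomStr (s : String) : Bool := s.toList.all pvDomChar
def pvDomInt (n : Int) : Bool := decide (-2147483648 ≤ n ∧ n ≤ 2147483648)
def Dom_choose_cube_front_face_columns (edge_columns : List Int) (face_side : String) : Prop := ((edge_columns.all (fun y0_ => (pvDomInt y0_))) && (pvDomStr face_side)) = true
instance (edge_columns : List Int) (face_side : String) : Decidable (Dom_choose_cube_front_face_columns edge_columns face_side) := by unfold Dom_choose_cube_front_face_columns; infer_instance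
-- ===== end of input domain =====

-- B replaces sort-then-slice by a single linear pass that keeps the two extreme values (objective: faster by algorithm; timing on large inputs was not measurable here).


-- ===== PORT A =====
def choose_cube_front_face_columns (edge_columns : List Int) (face_side : String) : Int × Int :=
  if edge_columns.length < 2 then (0, 0)   -- Python raises ValueError here; excluded by Pre_
  else
    let cols := PySem.List.sorted (edge_columns.map (fun x => x)) (fun x => x) false
    if face_side == "side-left" then
      let selected := PySem.List.slice cols (some (-2)) none
      (PySem.List.pyGetD selected 0 0, PySem.List.pyGetD selected 1 0)
    else if face_side == "side-right" then
      let selected := PySem.List.slice cols none (some 2)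
      (PySem.List.pyGetD selected 0 0, PySem.List.pyGetD selected 1 0)
    else (0, 0)                            -- Python raises ValueError here; excluded by Pre_

-- ===== PORT B =====
-- B-side helpers: the loop bodies of Source B's two scanning loops
def stepHi (p : Int × Int) (x : Int) : Int × Int :=
  if x > p.2 then (p.2, x) else if x > p.1 then (x, p.2) else p

def stepLo (p : Int × Int) (x : Int) : Int × Int :=
  if x < p.1 then (x, p.1) else if x < p.2 then (p.1, x) else p

def choose_cube_front_face_columns_alt (edge_columns : List Int) (face_side : String) : Int × Int :=
  if edge_columns.length < 2 then (0, 0)   -- Python raises ValueError here; excluded by Pre_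
  else
    let a := PySem.List.pyGetD edge_columns 0 0
    let b := PySem.List.pyGetD edge_columns 1 0
    let init := if a > b then (b, a) else (a, b)
    if face_side == "side-left" then
      (PySem.List.slice edge_columns (some 2) none).foldl stepHi init
    else if face_side == "side-right" then
      (PySem.List.slice edge_columns (some 2) none).foldl stepLo init
    else (0, 0)                            -- Python raises ValueError here; excluded by Pre_

-- ===== PRECONDITION & SPEC =====
-- Pre_: exactly where the Python A returns normally (≥ 2 columns and a known face side; otherwise A raises ValueError)
def Pre_choose_cube_front_face_columns (edge_columns : List Int) (face_side : String) : Prop :=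
  2 ≤ edge_columns.length ∧ (face_side = "side-left" ∨ face_side = "side-right")
instance (edge_columns : List Int) (face_side : String) : Decidable (Pre_choose_cube_front_face_columns edge_columns face_side) := by unfold Pre_choose_cube_front_face_columns; infer_instance

def pvWitness_choose_cube_front_face_columns : List Int × String := ([3, 1, 2], "side-left")

def Spec_choose_cube_front_face_columns (edge_columns : List Int) (face_side : String) (out : Int × Int) : Prop := out = choose_cube_front_face_columns_alt edge_columns face_side
instance (edge_columns : List Int) (face_side : String) (out : Int × Int) : Decidable (Spec_choose_cube_front_face_columns edge_columns face_side out) := by unfold Spec_choose_cube_front_face_columns; infer_instance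

-- ===== CLAIM (what is proved, stated in full; the proofs are below) =====
def Claim_equal_choose_cube_front_face_columns : Prop := ∀ (edge_columns : List Int) (face_side : String), Dom_choose_cube_front_face_columns edge_columns face_side → Pre_choose_cube_front_face_columns edge_columns face_side → Spec_choose_cube_front_face_columns edge_columns face_side (choose_cube_front_face_columns edge_columns face_side)

-- ===== LEMMAS AND PROOFS =====

-- (u, v) are "the two largest elements" of the multiset m: v is a maximum and u a maximum of the rest
def TopTwo (m : Multiset Int) (p : Int × Int) : Prop :=
  p.1 ≤ p.2 ∧ p.2 ∈ m ∧ p.1 ∈ m.erase p.2 ∧ ∀ y ∈ m.erase p.2, y ≤ p.1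

-- (u, v) are "the two smallest elements": u is a minimum and v a minimum of the rest
def BotTwo (m : Multiset Int) (p : Int × Int) : Prop :=
  p.1 ≤ p.2 ∧ p.1 ∈ m ∧ p.2 ∈ m.erase p.1 ∧ ∀ y ∈ m.erase p.1, p.2 ≤ y

lemma topTwo_unique {m : Multiset Int} {p q : Int × Int} (hp : TopTwo m p) (hq : TopTwo m q) : p = q := by
  obtain ⟨hpo, hpv, hpu, hpb⟩ := hp
  obtain ⟨hqo, hqv, hqu, hqb⟩ := hq
  have hv : p.2 = q.2 := by
    by_cases h : p.2 = q.2
    · exact h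
    · have h1 : p.2 ∈ m.erase q.2 := (Multiset.mem_erase_of_ne h).2 hpv
      have h2 : q.2 ∈ m.erase p.2 := (Multiset.mem_erase_of_ne (Ne.symm h)).2 hqv
      have := hqb _ h1
      have := hpb _ h2
      omega
  have hu : p.1 = q.1 := by
    have h1 := hqb p.1 (hv ▸ hpu)
    have h2 := hpb q.1 (hv ▸ hqu)
    omega
  exact Prod.ext hu hv

lemma botTwo_unique {m : Multiset Int} {p q : Int × Int} (hp : BotTwo m p) (hq : BotTwo m q) : p = q := by
  obtain ⟨hpo, hpv, hpu, hpb⟩ := hp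
  obtain ⟨hqo, hqv, hqu, hqb⟩ := hq
  have hv : p.1 = q.1 := by
    by_cases h : p.1 = q.1
    · exact h
    · have h1 : p.1 ∈ m.erase q.1 := (Multiset.mem_erase_of_ne h).2 hpv
      have h2 : q.1 ∈ m.erase p.1 := (Multiset.mem_erase_of_ne (Ne.symm h)).2 hqv
      have := hqb _ h1
      have := hpb _ h2
      omega
  have hu : p.2 = q.2 := by
    have h1 := hqb p.2 (hv ▸ hpu)
    have h2 := hpb q.2 (hv ▸ hqu)
    omega
  exact Prod.ext hv hu

lemma stepHi_topTwo {m : Multiset Int} {p : Int × Int} (x : Int) (h : TopTwo m p) :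
    TopTwo (x ::ₘ m) (stepHi p x) := by
  obtain ⟨ho, hv, hu, hb⟩ := h
  have hmax : ∀ y ∈ m, y ≤ p.2 := by
    intro y hy
    by_cases hyv : y = p.2
    · omega
    · exact le_trans (hb y ((Multiset.mem_erase_of_ne hyv).2 hy)) ho
  unfold TopTwo stepHi
  split_ifs with h1 h2
  · -- x > p.2 : new pair (p.2, x)
    refine ⟨by omega, Multiset.mem_cons_self x m, ?_, ?_⟩
    · simpa [Multiset.erase_cons_head] using hv
    · intro y hy
      rw [Multiset.erase_cons_head] at hy
      exact hmax y hy
  · -- p.1 < x ≤ p.2 : new pair (x, p.2)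
    by_cases hxv : x = p.2
    · subst hxv
      refine ⟨le_refl _, Multiset.mem_cons_of_mem hv, ?_, ?_⟩
      · simpa [Multiset.erase_cons_head] using hv
      · intro y hy
        rw [Multiset.erase_cons_head] at hy
        exact hmax y hy
    · rw [Multiset.erase_cons_tail _ hxv]
      refine ⟨by omega, Multiset.mem_cons_of_mem hv, Multiset.mem_cons_self x _, ?_⟩
      intro y hy
      rcases Multiset.mem_cons.1 hy with hy | hy
      · omega
      · have := hb y hy; omega
  · -- x ≤ p.1 : pair unchanged
    by_cases hxv : x = p.2
    · have hx1 : p.1 = p.2 := by omega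
      refine ⟨ho, Multiset.mem_cons_of_mem hv, ?_, ?_⟩
      · subst hxv; rw [Multiset.erase_cons_head]
        exact Multiset.mem_of_mem_erase hu
      · subst hxv; rw [Multiset.erase_cons_head]
        intro y hy
        by_cases hyv : y = p.2
        · omega
        · exact hb y ((Multiset.mem_erase_of_ne hyv).2 hy)
    · rw [Multiset.erase_cons_tail _ hxv]
      refine ⟨ho, Multiset.mem_cons_of_mem hv, Multiset.mem_cons_of_mem hu, ?_⟩
      intro y hy
      rcases Multiset.mem_cons.1 hy with hy | hy
      · omega
      · exact hb y hy

lemma stepLo_botTwo {m : Multiset Int} {p : Int × Int} (x : Int) (h : BotTwo m p) :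
    BotTwo (x ::ₘ m) (stepLo p x) := by
  obtain ⟨ho, hv, hu, hb⟩ := h
  have hmin : ∀ y ∈ m, p.1 ≤ y := by
    intro y hy
    by_cases hyv : y = p.1
    · omega
    · exact le_trans ho (hb y ((Multiset.mem_erase_of_ne hyv).2 hy))
  unfold BotTwo stepLo
  split_ifs with h1 h2
  · -- x < p.1 : new pair (x, p.1)
    refine ⟨by omega, Multiset.mem_cons_self x m, ?_, ?_⟩
    · simpa [Multiset.erase_cons_head] using hv
    · intro y hy
      rw [Multiset.erase_cons_head] at hy
      exact hmin y hy
  · -- p.1 ≤ x < p.2 : new pair (p.1, x)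
    by_cases hxv : x = p.1
    · subst hxv
      refine ⟨le_refl _, Multiset.mem_cons_of_mem hv, ?_, ?_⟩
      · simpa [Multiset.erase_cons_head] using hv
      · intro y hy
        rw [Multiset.erase_cons_head] at hy
        exact hmin y hy
    · rw [Multiset.erase_cons_tail _ hxv]
      refine ⟨by omega, Multiset.mem_cons_of_mem hv, Multiset.mem_cons_self x _, ?_⟩
      intro y hy
      rcases Multiset.mem_cons.1 hy with hy | hy
      · omega
      · have := hb y hy; omega
  · -- x ≥ p.2 : pair unchanged
    by_cases hxv : x = p.1
    · have hx1 : p.1 = p.2 := by omega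
      refine ⟨ho, Multiset.mem_cons_of_mem hv, ?_, ?_⟩
      · subst hxv; rw [Multiset.erase_cons_head]
        exact Multiset.mem_of_mem_erase hu
      · subst hxv; rw [Multiset.erase_cons_head]
        intro y hy
        by_cases hyv : y = p.1
        · omega
        · exact hb y ((Multiset.mem_erase_of_ne hyv).2 hy)
    · rw [Multiset.erase_cons_tail _ hxv]
      refine ⟨ho, Multiset.mem_cons_of_mem hv, Multiset.mem_cons_of_mem hu, ?_⟩
      intro y hy
      rcases Multiset.mem_cons.1 hy with hy | hy
      · omega
      · exact hb y hy

lemma foldl_stepHi_topTwo : ∀ (t : List Int) (m : Multiset Int) (p : Int × Int),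
    TopTwo m p → TopTwo (m + ↑t) (t.foldl stepHi p) := by
  intro t
  induction t with
  | nil => intro m p h; simpa using h
  | cons x t ih =>
    intro m p h
    have := ih (x ::ₘ m) (stepHi p x) (stepHi_topTwo x h)
    simp only [List.foldl_cons]
    have hm : (x ::ₘ m) + (↑t : Multiset Int) = m + ↑(x :: t) := by
      rw [show ((x :: t : List Int) : Multiset Int) = x ::ₘ (↑t : Multiset Int) from rfl,
        Multiset.add_cons, Multiset.cons_add]
    rwa [hm] at this

lemma foldl_stepLo_botTwo : ∀ (t : List Int) (m : Multiset Int) (p : Int × Int),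
    BotTwo m p → BotTwo (m + ↑t) (t.foldl stepLo p) := by
  intro t
  induction t with
  | nil => intro m p h; simpa using h
  | cons x t ih =>
    intro m p h
    have := ih (x ::ₘ m) (stepLo p x) (stepLo_botTwo x h)
    simp only [List.foldl_cons]
    have hm : (x ::ₘ m) + (↑t : Multiset Int) = m + ↑(x :: t) := by
      rw [show ((x :: t : List Int) : Multiset Int) = x ::ₘ (↑t : Multiset Int) from rfl,
        Multiset.add_cons, Multiset.cons_add]
    rwa [hm] at this

lemma erase_pair_right (c d : Int) : ((c ::ₘ (d ::ₘ 0)) : Multiset Int).erase d = (c ::ₘ 0) := by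
  by_cases h : c = d
  · subst h; rw [Multiset.erase_cons_head]
  · rw [Multiset.erase_cons_tail _ h, Multiset.erase_cons_head]

lemma erase_pair_left (c d : Int) : ((c ::ₘ (d ::ₘ 0)) : Multiset Int).erase c = (d ::ₘ 0) := by
  rw [Multiset.erase_cons_head]

lemma topTwo_init (a b : Int) : TopTwo (↑[a, b]) (if a > b then (b, a) else (a, b)) := by
  split_ifs with h
  · refine ⟨by omega, ?_, ?_, ?_⟩
    · simp
    · show b ∈ (↑[a, b] : Multiset Int).erase a
      have : (↑[a, b] : Multiset Int) = a ::ₘ (b ::ₘ 0) := by rfl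
      rw [this, erase_pair_left]; simp
    · intro y hy
      have : (↑[a, b] : Multiset Int) = a ::ₘ (b ::ₘ 0) := by rfl
      rw [this, erase_pair_left] at hy
      simp at hy; omega
  · refine ⟨by omega, ?_, ?_, ?_⟩
    · simp
    · show a ∈ (↑[a, b] : Multiset Int).erase b
      have : (↑[a, b] : Multiset Int) = a ::ₘ (b ::ₘ 0) := by rfl
      rw [this, erase_pair_right]; simp
    · intro y hy
      have : (↑[a, b] : Multiset Int) = a ::ₘ (b ::ₘ 0) := by rfl
      rw [this, erase_pair_right] at hy
      simp at hy; omega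

lemma botTwo_init (a b : Int) : BotTwo (↑[a, b]) (if a > b then (b, a) else (a, b)) := by
  split_ifs with h
  · refine ⟨by omega, ?_, ?_, ?_⟩
    · simp
    · show a ∈ (↑[a, b] : Multiset Int).erase b
      have : (↑[a, b] : Multiset Int) = a ::ₘ (b ::ₘ 0) := by rfl
      rw [this, erase_pair_right]; simp
    · intro y hy
      have : (↑[a, b] : Multiset Int) = a ::ₘ (b ::ₘ 0) := by rfl
      rw [this, erase_pair_right] at hy
      simp at hy; omega
  · refine ⟨by omega, ?_, ?_, ?_⟩
    · simp
    · show b ∈ (↑[a, b] : Multiset Int).erase a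
      have : (↑[a, b] : Multiset Int) = a ::ₘ (b ::ₘ 0) := by rfl
      rw [this, erase_pair_left]; simp
    · intro y hy
      have : (↑[a, b] : Multiset Int) = a ::ₘ (b ::ₘ 0) := by rfl
      rw [this, erase_pair_left] at hy
      simp at hy; omega

-- the last two elements of a ≤-sorted list are its two largest
lemma topTwo_of_sorted_suffix {s pre : List Int} {c d : Int}
    (hs : s = pre ++ [c, d]) (hp : s.Pairwise (· ≤ ·)) : TopTwo (↑s) (c, d) := by
  subst hs
  rw [List.pairwise_append] at hp
  obtain ⟨hpre, hcd, hcross⟩ := hp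
  have hcd' : c ≤ d := by simp at hcd; exact hcd
  have hm : (↑(pre ++ [c, d]) : Multiset Int) = ↑pre + ↑[c, d] := by
    simp
  have herase : (↑(pre ++ [c, d]) : Multiset Int).erase d = ↑pre + (c ::ₘ 0) := by
    rw [hm]
    rw [Multiset.erase_add_right_pos _ (by simp)]
    congr 1
    exact erase_pair_right c d
  refine ⟨hcd', ?_, ?_, ?_⟩
  · simp
  · show c ∈ (↑(pre ++ [c, d]) : Multiset Int).erase d
    rw [herase]; simp
  · intro y hy
    rw [herase] at hy
    rcases Multiset.mem_add.1 hy with hy | hy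
    · exact hcross y (by simpa using hy) c (by simp)
    · simp at hy; omega

-- the first two elements of a ≤-sorted list are its two smallest
lemma botTwo_of_sorted_prefix {s post : List Int} {c d : Int}
    (hs : s = [c, d] ++ post) (hp : s.Pairwise (· ≤ ·)) : BotTwo (↑s) (c, d) := by
  subst hs
  have hp' : (c :: d :: post).Pairwise (· ≤ ·) := by simpa using hp
  rw [List.pairwise_cons] at hp'
  obtain ⟨hc, hp'⟩ := hp'
  rw [List.pairwise_cons] at hp'
  obtain ⟨hd, _⟩ := hp'
  have hcd : c ≤ d := hc d (by simp)
  have herase : (↑([c, d] ++ post) : Multiset Int).erase c = ↑(d :: post) := by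
    show ((c ::ₘ ↑(d :: post)) : Multiset Int).erase c = ↑(d :: post)
    rw [Multiset.erase_cons_head]
  refine ⟨hcd, by simp, ?_, ?_⟩
  · rw [herase]; simp
  · intro y hy
    rw [herase] at hy
    rcases (by simpa using hy : y = d ∨ y ∈ post) with hy | hy
    · omega
    · exact hd y hy

-- the two branch computations, for a list of length ≥ 2
lemma left_branch (l : List Int) (a b : Int) (t : List Int) (hl : l = a :: b :: t) :
    (let s := PySem.List.sorted l (fun x => x) false
     (PySem.List.pyGetD (PySem.List.slice s (some (-2)) none) 0 0,
      PySem.List.pyGetD (PySem.List.slice s (some (-2)) none) 1 0))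
      = t.foldl stepHi (if a > b then (b, a) else (a, b)) := by
  set s : List Int := PySem.List.sorted l (fun x => x) false with hsdef
  have hperm : s.Perm l := PySem.List.sorted_perm l (fun x => x) false
  have hpair : s.Pairwise (· ≤ ·) := by
    have := PySem.List.sorted_pairwise (xs := l) (key := fun x => x)
    simpa using this
  have hslen : s.length = t.length + 2 := by
    have := hperm.length_eq; simp [hl] at this; omega
  have hcoe : (↑s : Multiset Int) = ↑l := Multiset.coe_eq_coe.2 hperm
  -- the last two elements of s
  have hdlen : (s.drop (s.length - 2)).length = 2 := by rw [List.length_drop]; omega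
  obtain ⟨c, d, hdropeq⟩ : ∃ c d, s.drop (s.length - 2) = [c, d] := by
    match hsd : s.drop (s.length - 2), hdlen with
    | [c, d], _ => exact ⟨c, d, rfl⟩
  have hsplit : s = s.take (s.length - 2) ++ [c, d] := by
    conv_lhs => rw [← List.take_append_drop (s.length - 2) s]
    rw [hdropeq]
  have hslice : PySem.List.slice s (some (-2)) none = [c, d] := by
    rw [PySem.List.slice_from_neg_ofNat s 2 (by omega), hdropeq]
  have hA : TopTwo (↑l) (c, d) := hcoe ▸ topTwo_of_sorted_suffix hsplit hpair
  have hB : TopTwo (↑l) (t.foldl stepHi (if a > b then (b, a) else (a, b))) := by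
    have := foldl_stepHi_topTwo t (↑[a, b]) _ (topTwo_init a b)
    have hm : (↑[a, b] : Multiset Int) + ↑t = ↑l := by
      rw [hl]
      rfl
    rwa [hm] at this
  have heq := topTwo_unique hA hB
  simp only [hslice, ← heq, Prod.mk.injEq]
  refine ⟨PySem.List.pyGetD_zero_cons _ _ _, ?_⟩
  rw [show (1 : Int) = ((1 : Nat) : Int) from rfl, PySem.List.pyGetD_natCast]
  rfl

lemma right_branch (l : List Int) (a b : Int) (t : List Int) (hl : l = a :: b :: t) :
    (let s := PySem.List.sorted l (fun x => x) false
     (PySem.List.pyGetD (PySem.List.slice s none (some 2)) 0 0,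
      PySem.List.pyGetD (PySem.List.slice s none (some 2)) 1 0))
      = t.foldl stepLo (if a > b then (b, a) else (a, b)) := by
  set s : List Int := PySem.List.sorted l (fun x => x) false with hsdef
  have hperm : s.Perm l := PySem.List.sorted_perm l (fun x => x) false
  have hpair : s.Pairwise (· ≤ ·) := by
    have := PySem.List.sorted_pairwise (xs := l) (key := fun x => x)
    simpa using this
  have hslen : s.length = t.length + 2 := by
    have := hperm.length_eq; simp [hl] at this; omega
  have hcoe : (↑s : Multiset Int) = ↑l := Multiset.coe_eq_coe.2 hperm
  obtain ⟨c, d, post, hshape⟩ : ∃ c d post, s = c :: d :: post := by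
    match s, hslen with
    | c :: d :: post, _ => exact ⟨c, d, post, rfl⟩
  have hslice : PySem.List.slice s none (some 2) = [c, d] := by
    rw [PySem.List.slice_to s (by omega : (0:Int) ≤ 2), hshape]
    rfl
  have hA : BotTwo (↑l) (c, d) := hcoe ▸ botTwo_of_sorted_prefix (by simpa using hshape) hpair
  have hB : BotTwo (↑l) (t.foldl stepLo (if a > b then (b, a) else (a, b))) := by
    have := foldl_stepLo_botTwo t (↑[a, b]) _ (botTwo_init a b)
    have hm : (↑[a, b] : Multiset Int) + ↑t = ↑l := by
      rw [hl]
      rfl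
    rwa [hm] at this
  have heq := botTwo_unique hA hB
  simp only [hslice, ← heq, Prod.mk.injEq]
  refine ⟨PySem.List.pyGetD_zero_cons _ _ _, ?_⟩
  rw [show (1 : Int) = ((1 : Nat) : Int) from rfl, PySem.List.pyGetD_natCast]
  rfl

-- ===== VERDICT (by name: the statement is the Claim_ definition above) =====
theorem choose_cube_front_face_columns_spec : Claim_equal_choose_cube_front_face_columns := by
  intro l fs hDom hPre
  unfold Spec_choose_cube_front_face_columns
  obtain ⟨hlen, hside⟩ := hPre
  rcases l with _ | ⟨a, l'⟩
  · simp at hlen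
  rcases l' with _ | ⟨b, t⟩
  · simp at hlen
  have hnlt : ¬ (a :: b :: t : List Int).length < 2 := by simp
  have hget0 : PySem.List.pyGetD (a :: b :: t) 0 0 = a := PySem.List.pyGetD_zero_cons _ _ _
  have hget1 : PySem.List.pyGetD (a :: b :: t) 1 0 = b := by
    rw [show (1 : Int) = ((1 : Nat) : Int) from rfl, PySem.List.pyGetD_natCast]
    rfl
  have hdrop2 : PySem.List.slice (a :: b :: t) (some 2) none = t := by
    rw [show (2 : Int) = ((2 : Nat) : Int) from rfl, PySem.List.slice_from_natCast]
    rfl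
  rcases hside with hfs | hfs <;> subst hfs <;>
    simp only [choose_cube_front_face_columns, choose_cube_front_face_columns_alt,
      if_neg hnlt, List.map_id', hget0, hget1, hdrop2]
  · have := left_branch (a :: b :: t) a b t rfl
    simpa using this
  · have := right_branch (a :: b :: t) a b t rfl
    simpa using this
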